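-- pv_equiv track=rewrite | github.com/NikitaGuslyakov/Rustactagger | taggerrustwin.py | insert_nested_tags
-- ===== SOURCE A (Python) =====
-- from typing import Dict, List, Tuple, Optional
--
-- def insert_nested_tags(s: str, spans: List[Tuple[int,int,str,int]]) -> str:
--     opens, closes = {}, {}
--     for st, en, tg, pr in spans:
--         opens.setdefault(st, []).append((pr, tg))
--         closes.setdefault(en, []).append((pr, tg))
--     out = []
--     for i, ch in enumerate(s):
--         if i in opens:
--             for pr, tg in sorted(opens[i], key=lambda x: x[0]):
--                 out.append(tg)
--         out.append(ch)
--         if i + 1 in closes: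
--             for pr, tg in sorted(closes[i + 1], key=lambda x: -x[0]):
--                 out.append(tg)
--     if len(s) in closes:
--         for pr, tg in sorted(closes[len(s)], key=lambda x: -x[0]):
--             out.append(tg)
--     return "".join(out)
-- ===== SOURCE B (Python) =====
-- def insert_nested_tags(s, spans):
--     n = len(s)
--     bounds = sorted({sp[0] for sp in spans if 0 <= sp[0] < n}
--                     | {sp[1] for sp in spans if 1 <= sp[1] <= n})
--     parts = []
--     prev = 0
--     for p in bounds:
--         parts.append(s[prev:p])
--         if p >= 1:
--             parts += [sp[2] for sp in sorted([sp for sp in spans if sp[1] == p],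
--                                              key=lambda sp: -sp[3])]
--         if p < n:
--             parts += [sp[2] for sp in sorted([sp for sp in spans if sp[0] == p],
--                                              key=lambda sp: sp[3])]
--         prev = p
--     parts.append(s[prev:])
--     return "".join(parts)
-- ===== Notes on version B (the rewrite author's own statement) =====
-- stated objective: faster
-- what changed: B drops A's per-character scan (dict lookup at every index) and its open/close dicts entirely: it computes the sorted set of in-range boundary positions, then for each such position splices the whole string slice since the previous boundary followed by the close spans (filtered from spans, sorted by descending priority) and the open spans (filtered, ascending priority).
-- intended difference: On inputs with a span ending exactly at len(s) with a nonempty tag, A emits that closing tag an extra time (twice for nonempty s - once after the last character and again in the trailing block - and once even for empty s, where no character or open tag is emitted), while B emits it exactly once inside the string (never for empty s), which is the intended single close. — e.g. on insert_nested_tags("a", [(0, 1, "<x>", 1)]): A returns "<x>a<x><x>", B returns "<x>a<x>"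
import Mathlib
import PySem

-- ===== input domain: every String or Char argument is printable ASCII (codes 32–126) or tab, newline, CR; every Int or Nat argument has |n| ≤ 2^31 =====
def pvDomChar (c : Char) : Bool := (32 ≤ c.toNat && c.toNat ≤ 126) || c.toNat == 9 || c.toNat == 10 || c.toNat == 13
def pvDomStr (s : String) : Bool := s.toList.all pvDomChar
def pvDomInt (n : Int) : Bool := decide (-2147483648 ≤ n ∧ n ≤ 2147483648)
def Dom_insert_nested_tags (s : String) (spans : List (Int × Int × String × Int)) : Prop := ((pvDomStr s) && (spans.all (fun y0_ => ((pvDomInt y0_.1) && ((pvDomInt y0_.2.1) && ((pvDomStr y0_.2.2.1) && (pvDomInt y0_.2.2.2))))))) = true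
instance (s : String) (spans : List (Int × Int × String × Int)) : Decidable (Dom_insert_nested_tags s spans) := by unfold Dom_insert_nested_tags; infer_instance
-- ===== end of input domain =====

-- B replaces A's per-character scan and its open/close dicts by a walk over the sorted set of
-- in-range boundary positions, splicing slices and per-position filtered-and-sorted span tags
-- (objective: faster, measured); B intentionally drops A's
-- duplicate close tags at position len(s) (see D_ below).

-- ===== PORT A =====
def insert_nested_tags (s : String) (spans : List (Int × Int × String × Int)) : String :=
  let dicts : PySem.Dict Int (List (Int × String)) × PySem.Dict Int (List (Int × String)) :=
    spans.foldl (fun d sp =>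
      (d.1.modify sp.1 [] (· ++ [(sp.2.2.2, sp.2.2.1)]),
       d.2.modify sp.2.1 [] (· ++ [(sp.2.2.2, sp.2.2.1)]))) (PySem.Dict.empty, PySem.Dict.empty)
  let opens := dicts.1
  let closes := dicts.2
  let out : List String := (PySem.List.enumerate s.toList 0).foldl (fun out ic =>
    let out := if opens.contains ic.1 then
        (PySem.List.sorted (opens.getD ic.1 []) (fun x => x.1)).foldl (fun o t => o ++ [t.2]) out
      else out
    let out := out ++ [String.singleton ic.2]
    if closes.contains (ic.1 + 1) then
        (PySem.List.sorted (closes.getD (ic.1 + 1) []) (fun x => -x.1)).foldl (fun o t => o ++ [t.2]) out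
      else out) []
  let out := if closes.contains (PySem.Str.len s) then
      (PySem.List.sorted (closes.getD (PySem.Str.len s) []) (fun x => -x.1)).foldl (fun o t => o ++ [t.2]) out
    else out
  PySem.Str.join "" out

-- ===== PORT B =====
def insert_nested_tags_alt (s : String) (spans : List (Int × Int × String × Int)) : String :=
  let n := PySem.Str.len s
  let bounds : List Int := PySem.List.sorted (PySem.Set.union
      (PySem.Set.ofList ((spans.filter (fun sp => decide (0 ≤ sp.1 ∧ sp.1 < n))).map (·.1)))
      ((spans.filter (fun sp => decide (1 ≤ sp.2.1 ∧ sp.2.1 ≤ n))).map (·.2.1))) (fun x => x)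
  let res : List String × Int := bounds.foldl (fun acc p =>
      let parts := acc.1 ++ [PySem.Str.slice s (some acc.2) (some p)]
      let parts := if 1 ≤ p then
          parts ++ (PySem.List.sorted (spans.filter (fun sp => sp.2.1 == p)) (fun sp => -sp.2.2.2)).map (·.2.2.1)
        else parts
      let parts := if p < n then
          parts ++ (PySem.List.sorted (spans.filter (fun sp => sp.1 == p)) (fun sp => sp.2.2.2)).map (·.2.2.1)
        else parts
      (parts, p)) ([], 0)
  PySem.Str.join "" (res.1 ++ [PySem.Str.slice s (some res.2) none])

-- ===== PRECONDITION & SPEC =====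
-- On spans ending exactly at len(s) with a nonempty tag, A emits that closing tag an
-- extra time (for nonempty s it appears both after the last character and again in the
-- trailing block; for empty s it appears although no character and no open tag is ever
-- emitted), while B emits each closing tag exactly once inside the string — the
-- intended single close.
def D_insert_nested_tags (s : String) (spans : List (Int × Int × String × Int)) : Prop :=
  ∃ sp ∈ spans, sp.2.1 = (s.toList.length : Int) ∧ sp.2.2.1 ≠ ""
instance (s : String) (spans : List (Int × Int × String × Int)) : Decidable (D_insert_nested_tags s spans) := by unfold D_insert_nested_tags; infer_instance

def Spec_insert_nested_tags (s : String) (spans : List (Int × Int × String × Int)) (out : String) : Prop := ¬ D_insert_nested_tags s spans → out = insert_nested_tags_alt s spans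
instance (s : String) (spans : List (Int × Int × String × Int)) (out : String) : Decidable (Spec_insert_nested_tags s spans out) := by unfold Spec_insert_nested_tags; infer_instance

def pvDiffWitness_insert_nested_tags : String × (List (Int × Int × String × Int)) := ("a", [(0, 1, "<x>", 1)])
def pvDiffWitnessOut_insert_nested_tags : String × String := ("<x>a<x><x>", "<x>a<x>")

-- ===== CLAIM (what is proved, stated in full; the proofs are below) =====
def Claim_unchanged_insert_nested_tags : Prop := ∀ (s : String) (spans : List (Int × Int × String × Int)), Dom_insert_nested_tags s spans → Spec_insert_nested_tags s spans (insert_nested_tags s spans)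
def Claim_changed_insert_nested_tags : Prop := Dom_insert_nested_tags (pvDiffWitness_insert_nested_tags.1) (pvDiffWitness_insert_nested_tags.2) ∧ D_insert_nested_tags (pvDiffWitness_insert_nested_tags.1) (pvDiffWitness_insert_nested_tags.2) ∧ insert_nested_tags (pvDiffWitness_insert_nested_tags.1) (pvDiffWitness_insert_nested_tags.2) = pvDiffWitnessOut_insert_nested_tags.1 ∧ insert_nested_tags_alt (pvDiffWitness_insert_nested_tags.1) (pvDiffWitness_insert_nested_tags.2) = pvDiffWitnessOut_insert_nested_tags.2 ∧ pvDiffWitnessOut_insert_nested_tags.1 ≠ pvDiffWitnessOut_insert_nested_tags.2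
def Claim_exact_insert_nested_tags : Prop := ∀ (s : String) (spans : List (Int × Int × String × Int)), Dom_insert_nested_tags s spans → D_insert_nested_tags s spans → insert_nested_tags s spans ≠ insert_nested_tags_alt s spans

-- ===== LEMMAS AND PROOFS =====

-- (pr, tg) payload of a span, as A stores it in its dicts
def pvTag (sp : Int × Int × String × Int) : Int × String := (sp.2.2.2, sp.2.2.1)
-- payloads of the spans opening (resp. closing) at position q, in span order
def pvOL (spans : List (Int × Int × String × Int)) (q : Int) : List (Int × String) :=
  (spans.filter (fun sp => sp.1 == q)).map pvTag
def pvCL (spans : List (Int × Int × String × Int)) (q : Int) : List (Int × String) :=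
  (spans.filter (fun sp => sp.2.1 == q)).map pvTag
-- flattened character stream of a list of emitted strings
def pvJC (out : List String) : List Char := (out.map String.toList).flatten
-- the open-tag (ascending priority) / close-tag (descending priority) text at q
def pvOTags (spans : List (Int × Int × String × Int)) (q : Int) : List Char :=
  pvJC ((PySem.List.sorted (pvOL spans q) (fun x => x.1)).map (·.2))
def pvCTags (spans : List (Int × Int × String × Int)) (q : Int) : List Char :=
  pvJC ((PySem.List.sorted (pvCL spans q) (fun x => -x.1)).map (·.2))

-- the common per-character normal form: tags/char/tags from position k on
def pvGA (cs : List Char) (spans : List (Int × Int × String × Int)) (k : Nat) : List Char :=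
  if h : k < cs.length then
    pvOTags spans k ++ cs[k] :: (pvCTags spans (k + 1) ++ pvGA cs spans (k + 1))
  else []
termination_by cs.length - k

-- B's boundary walk, abstracted over the tag-text functions
def pvWalk (cs : List Char) (oT cT : Int → List Char) : List Int → Int → List Char
  | [], prev => PySem.List.slice cs (some prev) none
  | p :: ps, prev => PySem.List.slice cs (some prev) (some p) ++ cT p ++ oT p ++ pvWalk cs oT cT ps p

-- position-indexed normal form of the walk, with explicit boundary membership
def pvFg (cs : List Char) (oT cT : Int → List Char) (ps : List Int) (k : Nat) : List Char :=
  if k ≤ cs.length then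
    (if (k : Int) ∈ ps then cT k ++ oT k else []) ++ ((cs.drop k).take 1 ++ pvFg cs oT cT ps (k + 1))
  else []
termination_by cs.length + 1 - k

-- A's dict pair, as built by A's port
def pvAD (spans : List (Int × Int × String × Int)) :
    PySem.Dict Int (List (Int × String)) × PySem.Dict Int (List (Int × String)) :=
  spans.foldl (fun d sp =>
    (d.1.modify sp.1 [] (· ++ [(sp.2.2.2, sp.2.2.1)]),
     d.2.modify sp.2.1 [] (· ++ [(sp.2.2.2, sp.2.2.1)]))) (PySem.Dict.empty, PySem.Dict.empty)

-- B's tag-text functions: the guards are B's range tests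
def pvOT2 (s : String) (spans : List (Int × Int × String × Int)) (q : Int) : List Char :=
  if q < (s.toList.length : Int) then pvOTags spans q else []
def pvCT2 (spans : List (Int × Int × String × Int)) (q : Int) : List Char :=
  if 1 ≤ q then pvCTags spans q else []
-- B's sorted boundary positions
def pvEvs (s : String) (spans : List (Int × Int × String × Int)) : List Int :=
  PySem.List.sorted (PySem.Set.union
    (PySem.Set.ofList ((spans.filter (fun sp => decide (0 ≤ sp.1 ∧ sp.1 < PySem.Str.len s))).map (·.1)))
    ((spans.filter (fun sp => decide (1 ≤ sp.2.1 ∧ sp.2.1 ≤ PySem.Str.len s))).map (·.2.1))) (fun x => x)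

theorem pvJC_append (a b : List String) : pvJC (a ++ b) = pvJC a ++ pvJC b := by
  simp [pvJC]

theorem pvJC_join (out : List String) : (PySem.Str.join "" out).toList = pvJC out := by
  rw [PySem.Str.toList_join]
  show PySem.Chars.join [] _ = _
  unfold pvJC
  generalize (out.map String.toList) = l
  simp only [PySem.Chars.join, List.intercalate]
  induction l with
  | nil => rfl
  | cons a t ih => cases t <;> simp_all [List.intersperse]

-- ---- stable sort commutes with map (key read through the map) ----
theorem pvInsertBy_map {α β : Type} (f : α → β) (key : β → Int) (x : α) (l : List α) :
    PySem.List.insertBy (fun a b => decide (key a < key b)) (f x) (l.map f)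
      = (PySem.List.insertBy (fun a b => decide (key (f a) < key (f b))) x l).map f := by
  induction l with
  | nil => rfl
  | cons y t ih =>
    simp only [List.map_cons, PySem.List.insertBy]
    split_ifs <;> simp_all

theorem pvSorted_map {α β : Type} (f : α → β) (key : β → Int) (l : List α) :
    PySem.List.sorted (l.map f) key false = (PySem.List.sorted l (fun a => key (f a)) false).map f := by
  rw [PySem.List.sorted_eq_foldl_insertBy, PySem.List.sorted_eq_foldl_insertBy, List.foldl_map]
  suffices h : ∀ (acc : List α),
      l.foldl (fun acc x => PySem.List.insertBy (fun a b => decide (key a < key b)) (f x) acc) (acc.map f)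
        = (l.foldl (fun acc x => PySem.List.insertBy (fun a b => decide (key (f a) < key (f b))) x acc) acc).map f by
    simpa using h []
  induction l with
  | nil => intro acc; rfl
  | cons y t ih =>
    intro acc
    simp only [List.foldl_cons]
    rw [pvInsertBy_map f key y acc]
    exact ih _

-- B's per-position close/open tag text equals the A-side normal form
theorem pvCText (spans : List (Int × Int × String × Int)) (q : Int) :
    pvJC ((PySem.List.sorted (spans.filter (fun sp => sp.2.1 == q)) (fun sp => -sp.2.2.2)).map (·.2.2.1))
      = pvCTags spans q := by
  unfold pvCTags pvCL
  rw [pvSorted_map pvTag (fun x => -x.1) (spans.filter (fun sp => sp.2.1 == q))]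
  rw [List.map_map]
  rfl

theorem pvOText (spans : List (Int × Int × String × Int)) (q : Int) :
    pvJC ((PySem.List.sorted (spans.filter (fun sp => sp.1 == q)) (fun sp => sp.2.2.2)).map (·.2.2.1))
      = pvOTags spans q := by
  unfold pvOTags pvOL
  rw [pvSorted_map pvTag (fun x => x.1) (spans.filter (fun sp => sp.1 == q))]
  rw [List.map_map]
  rfl

-- ---- A's dict characterizations ----
theorem pvAD_eq (spans : List (Int × Int × String × Int)) :
    pvAD spans = (spans.foldl (fun d sp => d.modify sp.1 [] (· ++ [(sp.2.2.2, sp.2.2.1)])) PySem.Dict.empty,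
                  spans.foldl (fun d sp => d.modify sp.2.1 [] (· ++ [(sp.2.2.2, sp.2.2.1)])) PySem.Dict.empty) := by
  unfold pvAD
  exact PySem.List.foldl_prod_mk (fun (d : PySem.Dict Int (List (Int × String))) (sp : Int × Int × String × Int) => d.modify sp.1 [] (· ++ [(sp.2.2.2, sp.2.2.1)])) (fun (d : PySem.Dict Int (List (Int × String))) (sp : Int × Int × String × Int) => d.modify sp.2.1 [] (· ++ [(sp.2.2.2, sp.2.2.1)])) spans _ _

theorem pvAD_fst_keys (spans : List (Int × Int × String × Int)) :
    (pvAD spans).1.keys = PySem.Set.update [] (spans.map (·.1)) := by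
  rw [pvAD_eq]
  show (spans.foldl (fun d sp => d.modify sp.1 [] (· ++ [(sp.2.2.2, sp.2.2.1)])) (PySem.Dict.empty : PySem.Dict Int (List (Int × String)))).keys = _
  rw [PySem.Dict.keys_foldl_modify_key spans (fun sp => sp.1) [] (fun _ sp => (· ++ [(sp.2.2.2, sp.2.2.1)]))]
  rfl

theorem pvAD_snd_keys (spans : List (Int × Int × String × Int)) :
    (pvAD spans).2.keys = PySem.Set.update [] (spans.map (·.2.1)) := by
  rw [pvAD_eq]
  show (spans.foldl (fun d sp => d.modify sp.2.1 [] (· ++ [(sp.2.2.2, sp.2.2.1)])) (PySem.Dict.empty : PySem.Dict Int (List (Int × String)))).keys = _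
  rw [PySem.Dict.keys_foldl_modify_key spans (fun sp => sp.2.1) [] (fun _ sp => (· ++ [(sp.2.2.2, sp.2.2.1)]))]
  rfl

theorem pvAD_fst_getD (spans : List (Int × Int × String × Int)) (q : Int) :
    (pvAD spans).1.getD q [] = pvOL spans q := by
  rw [pvAD_eq]
  show (spans.foldl (fun d sp => d.modify sp.1 [] (· ++ [(sp.2.2.2, sp.2.2.1)])) (PySem.Dict.empty : PySem.Dict Int (List (Int × String)))).getD q [] = _
  have h2 : (spans.foldl (fun d sp => d.modify sp.1 [] (· ++ [(sp.2.2.2, sp.2.2.1)])) (PySem.Dict.empty : PySem.Dict Int (List (Int × String)))) = ((spans.map (fun sp => (sp.1, (sp.2.2.2, sp.2.2.1)))).foldl (fun d p => d.modify p.1 [] (· ++ [p.2])) PySem.Dict.empty) :=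
    (List.foldl_map (f := fun sp => (sp.1, (sp.2.2.2, sp.2.2.1))) (g := fun d p => d.modify p.1 [] (· ++ [p.2])) (l := spans) (init := PySem.Dict.empty)).symm
  rw [h2, PySem.Dict.getD_foldl_modify_append]
  simp [pvOL, pvTag, List.filter_map, Function.comp_def]

theorem pvAD_snd_getD (spans : List (Int × Int × String × Int)) (q : Int) :
    (pvAD spans).2.getD q [] = pvCL spans q := by
  rw [pvAD_eq]
  show (spans.foldl (fun d sp => d.modify sp.2.1 [] (· ++ [(sp.2.2.2, sp.2.2.1)])) (PySem.Dict.empty : PySem.Dict Int (List (Int × String)))).getD q [] = _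
  have h2 : (spans.foldl (fun d sp => d.modify sp.2.1 [] (· ++ [(sp.2.2.2, sp.2.2.1)])) (PySem.Dict.empty : PySem.Dict Int (List (Int × String)))) = ((spans.map (fun sp => (sp.2.1, (sp.2.2.2, sp.2.2.1)))).foldl (fun d p => d.modify p.1 [] (· ++ [p.2])) PySem.Dict.empty) :=
    (List.foldl_map (f := fun sp => (sp.2.1, (sp.2.2.2, sp.2.2.1))) (g := fun d p => d.modify p.1 [] (· ++ [p.2])) (l := spans) (init := PySem.Dict.empty)).symm
  rw [h2, PySem.Dict.getD_foldl_modify_append]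
  simp [pvCL, pvTag, List.filter_map, Function.comp_def]

theorem pvAD_fst_not_mem (spans : List (Int × Int × String × Int)) (q : Int)
    (h : (pvAD spans).1.contains q = false) : pvOL spans q = [] := by
  have hk : ¬ q ∈ (pvAD spans).1.keys := by
    rw [← PySem.Dict.contains_iff_mem_keys, h]
    simp
  rw [pvAD_fst_keys, PySem.Set.mem_update] at hk
  push Not at hk
  unfold pvOL
  have hnil : spans.filter (fun sp => sp.1 == q) = [] := by
    apply List.filter_eq_nil_iff.mpr
    intro sp hsp
    simp only [beq_iff_eq]
    intro he
    exact hk.2 (List.mem_map.mpr ⟨sp, hsp, he⟩)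
  rw [hnil, List.map_nil]

theorem pvAD_snd_not_mem (spans : List (Int × Int × String × Int)) (q : Int)
    (h : (pvAD spans).2.contains q = false) : pvCL spans q = [] := by
  have hk : ¬ q ∈ (pvAD spans).2.keys := by
    rw [← PySem.Dict.contains_iff_mem_keys, h]
    simp
  rw [pvAD_snd_keys, PySem.Set.mem_update] at hk
  push Not at hk
  unfold pvCL
  have hnil : spans.filter (fun sp => sp.2.1 == q) = [] := by
    apply List.filter_eq_nil_iff.mpr
    intro sp hsp
    simp only [beq_iff_eq]
    intro he
    exact hk.2 (List.mem_map.mpr ⟨sp, hsp, he⟩)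
  rw [hnil, List.map_nil]

-- ---- B's boundary list ----
theorem pvEvs_mem (s : String) (spans : List (Int × Int × String × Int)) (q : Int) :
    q ∈ pvEvs s spans ↔
      (∃ sp ∈ spans, sp.1 = q ∧ 0 ≤ q ∧ q < (s.toList.length : Int))
      ∨ (∃ sp ∈ spans, sp.2.1 = q ∧ 1 ≤ q ∧ q ≤ (s.toList.length : Int)) := by
  unfold pvEvs
  rw [PySem.List.mem_sorted, PySem.Set.mem_union, PySem.Set.mem_ofList, PySem.Str.len_eq]
  simp only [List.mem_map, List.mem_filter, decide_eq_true_eq]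
  constructor
  · rintro (⟨sp, ⟨hsp, hr⟩, rfl⟩ | ⟨sp, ⟨hsp, hr⟩, rfl⟩)
    · exact Or.inl ⟨sp, hsp, rfl, hr⟩
    · exact Or.inr ⟨sp, hsp, rfl, hr⟩
  · rintro (⟨sp, hsp, rfl, hr⟩ | ⟨sp, hsp, rfl, hr⟩)
    · exact Or.inl ⟨sp, ⟨hsp, hr⟩, rfl⟩
    · exact Or.inr ⟨sp, ⟨hsp, hr⟩, rfl⟩

theorem pvEvs_bounds (s : String) (spans : List (Int × Int × String × Int)) (q : Int)
    (h : q ∈ pvEvs s spans) : 0 ≤ q ∧ q ≤ (s.toList.length : Int) := by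
  rw [pvEvs_mem] at h
  rcases h with ⟨_, _, _, h1, h2⟩ | ⟨_, _, _, h1, h2⟩ <;> omega

theorem pvEvs_pairwise (s : String) (spans : List (Int × Int × String × Int)) :
    (pvEvs s spans).Pairwise (· < ·) := by
  unfold pvEvs
  have hnd : (PySem.Set.union
      (PySem.Set.ofList ((spans.filter (fun sp => decide (0 ≤ sp.1 ∧ sp.1 < PySem.Str.len s))).map (·.1)))
      ((spans.filter (fun sp => decide (1 ≤ sp.2.1 ∧ sp.2.1 ≤ PySem.Str.len s))).map (·.2.1))).Nodup :=
    PySem.Set.nodup_union _ _ (PySem.Set.nodup_ofList _)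
  have hle := PySem.List.sorted_pairwise (PySem.Set.union
      (PySem.Set.ofList ((spans.filter (fun sp => decide (0 ≤ sp.1 ∧ sp.1 < PySem.Str.len s))).map (·.1)))
      ((spans.filter (fun sp => decide (1 ≤ sp.2.1 ∧ sp.2.1 ≤ PySem.Str.len s))).map (·.2.1))) (fun x => x)
  have hnd2 := (PySem.List.sorted_perm (PySem.Set.union
      (PySem.Set.ofList ((spans.filter (fun sp => decide (0 ≤ sp.1 ∧ sp.1 < PySem.Str.len s))).map (·.1)))
      ((spans.filter (fun sp => decide (1 ≤ sp.2.1 ∧ sp.2.1 ≤ PySem.Str.len s))).map (·.2.1))) (fun x => x) false).nodup_iff.mpr hnd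
  exact (hle.and hnd2).imp (fun h => lt_of_le_of_ne h.1 h.2)

theorem pvOL_nil_of_not_evs (s : String) (spans : List (Int × Int × String × Int)) (q : Int)
    (hq : 0 ≤ q ∧ q < (s.toList.length : Int)) (h : ¬ q ∈ pvEvs s spans) :
    pvOL spans q = [] := by
  rw [pvEvs_mem] at h
  unfold pvOL
  have hnil : spans.filter (fun sp => sp.1 == q) = [] := by
    apply List.filter_eq_nil_iff.mpr
    intro sp hsp
    simp only [beq_iff_eq]
    intro he
    exact h (Or.inl ⟨sp, hsp, he, hq⟩)
  rw [hnil, List.map_nil]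

theorem pvCL_nil_of_not_evs (s : String) (spans : List (Int × Int × String × Int)) (q : Int)
    (hq : 1 ≤ q ∧ q ≤ (s.toList.length : Int)) (h : ¬ q ∈ pvEvs s spans) :
    pvCL spans q = [] := by
  rw [pvEvs_mem] at h
  unfold pvCL
  have hnil : spans.filter (fun sp => sp.2.1 == q) = [] := by
    apply List.filter_eq_nil_iff.mpr
    intro sp hsp
    simp only [beq_iff_eq]
    intro he
    exact h (Or.inr ⟨sp, hsp, he, hq⟩)
  rw [hnil, List.map_nil]

-- ---- Fg machinery ----
theorem pvFg_gt (cs : List Char) (oT cT : Int → List Char) (ps : List Int) (k : Nat)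
    (h : cs.length < k) : pvFg cs oT cT ps k = [] := by
  unfold pvFg
  rw [if_neg (by omega)]

theorem pvFg_nil (cs : List Char) (oT cT : Int → List Char) (k : Nat) :
    pvFg cs oT cT [] k = cs.drop k := by
  unfold pvFg
  by_cases h : k ≤ cs.length
  · rw [if_pos h]
    rw [pvFg_nil cs oT cT (k + 1)]
    simp only [List.not_mem_nil, if_false]
    rw [← List.drop_drop, List.take_append_drop, List.nil_append]
  · rw [if_neg h]
    rw [List.drop_eq_nil_of_le (by omega)]
termination_by cs.length + 1 - k

theorem pvFg_congr (cs : List Char) (oT cT : Int → List Char) (ps ps' : List Int) (k : Nat)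
    (h : ∀ j : Nat, k ≤ j → ((j : Int) ∈ ps ↔ (j : Int) ∈ ps')) :
    pvFg cs oT cT ps k = pvFg cs oT cT ps' k := by
  unfold pvFg
  by_cases hk : k ≤ cs.length
  · rw [if_pos hk, if_pos hk]
    rw [pvFg_congr cs oT cT ps ps' (k + 1) (fun j hj => h j (by omega))]
    congr 2
    exact propext (h k le_rfl)
  · rw [if_neg hk, if_neg hk]
termination_by cs.length + 1 - k

theorem pvFg_skip (cs : List Char) (oT cT : Int → List Char) (ps : List Int) (k m : Nat)
    (hkm : k ≤ m) (h : ∀ j : Nat, k ≤ j → j < m → ¬ (j : Int) ∈ ps) :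
    pvFg cs oT cT ps k = (cs.drop k).take (m - k) ++ pvFg cs oT cT ps m := by
  by_cases hkm' : k = m
  · subst hkm'
    simp
  · have hlt : k < m := by omega
    by_cases hk : k ≤ cs.length
    · conv_lhs => rw [pvFg]
      rw [if_pos hk, if_neg (h k le_rfl hlt), List.nil_append]
      rw [pvFg_skip cs oT cT ps (k + 1) m (by omega) (fun j hj1 hj2 => h j (by omega) hj2)]
      rw [← List.append_assoc]
      congr 1
      rw [show m - k = 1 + (m - (k + 1)) by omega, List.take_add]
      congr 1
      rw [← List.drop_drop]
    · rw [pvFg_gt cs oT cT ps k (by omega), pvFg_gt cs oT cT ps m (by omega)]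
      rw [List.drop_eq_nil_of_le (by omega)]
      simp
termination_by m - k

theorem pvWalk_eq_pvFg (cs : List Char) (oT cT : Int → List Char) (ps : List Int) (prev : Nat)
    (hs : ps.Pairwise (· < ·)) (hb : ∀ p ∈ ps, (prev : Int) ≤ p ∧ p ≤ (cs.length : Int)) :
    pvWalk cs oT cT ps (prev : Int) = pvFg cs oT cT ps prev := by
  induction ps generalizing prev with
  | nil =>
    show PySem.List.slice cs (some (prev : Int)) none = _
    rw [PySem.List.slice_from_natCast, pvFg_nil]
  | cons p ps ih =>
    obtain ⟨hpl, hpu⟩ := hb p List.mem_cons_self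
    have hp0 : (0 : Int) ≤ p := le_trans (Int.natCast_nonneg prev) hpl
    obtain ⟨pN, rfl⟩ : ∃ pN : Nat, p = (pN : Int) := ⟨p.toNat, (Int.toNat_of_nonneg hp0).symm⟩
    obtain ⟨hhead, htail⟩ := List.pairwise_cons.mp hs
    have hprevle : prev ≤ pN := by omega
    have hple : pN ≤ cs.length := by omega
    show PySem.List.slice cs (some ((prev : Nat) : Int)) (some ((pN : Nat) : Int)) ++ cT (pN : Int) ++ oT (pN : Int) ++ pvWalk cs oT cT ps ((pN : Nat) : Int) = _
    rw [ih pN htail (fun q hq => ⟨le_of_lt (hhead q hq), (hb q (List.mem_cons_of_mem _ hq)).2⟩)]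
    rw [pvFg_skip cs oT cT (((pN : Nat) : Int) :: ps) prev pN hprevle (fun j hj1 hj2 => by
      intro hmem
      rcases List.mem_cons.mp hmem with h | h
      · have : j = pN := by exact_mod_cast h
        omega
      · have hlt := hhead _ h
        omega)]
    have e1 : pvFg cs oT cT (((pN : Nat) : Int) :: ps) pN
        = (cT (pN : Int) ++ oT (pN : Int)) ++ ((cs.drop pN).take 1 ++ pvFg cs oT cT (((pN : Nat) : Int) :: ps) (pN + 1)) := by
      conv_lhs => rw [pvFg]
      rw [if_pos hple, if_pos List.mem_cons_self]
    have e2 : pvFg cs oT cT (((pN : Nat) : Int) :: ps) (pN + 1) = pvFg cs oT cT ps (pN + 1) := by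
      apply pvFg_congr
      intro j hj
      simp only [List.mem_cons]
      constructor
      · rintro (h | h)
        · exfalso
          have : j = pN := by exact_mod_cast h
          omega
        · exact h
      · intro h
        exact Or.inr h
    have e3 : pvFg cs oT cT ps pN = (cs.drop pN).take 1 ++ pvFg cs oT cT ps (pN + 1) := by
      conv_lhs => rw [pvFg]
      rw [if_pos hple, if_neg (fun hmem => by
        have hlt := hhead _ hmem
        omega), List.nil_append]
    rw [e1, e2, ← e3]
    rw [PySem.List.slice_natCast]
    simp [List.append_assoc]

theorem pvOTags_nil_of (spans : List (Int × Int × String × Int)) (q : Int)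
    (h : pvOL spans q = []) : pvOTags spans q = [] := by
  unfold pvOTags
  rw [h]
  rfl

theorem pvCTags_nil_of (spans : List (Int × Int × String × Int)) (q : Int)
    (h : pvCL spans q = []) : pvCTags spans q = [] := by
  unfold pvCTags
  rw [h]
  rfl

-- the walk over B's boundary list produces the per-character normal form
theorem pvFg_evs (s : String) (spans : List (Int × Int × String × Int)) (k : Nat)
    (hk : k ≤ s.toList.length) :
    pvFg s.toList (pvOT2 s spans) (pvCT2 spans) (pvEvs s spans) k
      = pvCT2 spans (k : Int) ++ pvGA s.toList spans k := by
  by_cases hkl : k < s.toList.length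
  · conv_lhs => rw [pvFg]
    rw [if_pos hk]
    rw [pvFg_evs s spans (k + 1) (by omega)]
    have htake : (s.toList.drop k).take 1 = [s.toList[k]] := by
      rw [List.drop_eq_getElem_cons hkl]
      rfl
    have hC1 : pvCT2 spans ((k + 1 : Nat) : Int) = pvCTags spans ((k : Int) + 1) := by
      unfold pvCT2
      rw [if_pos (by push_cast; omega)]
      push_cast
      rfl
    conv_rhs => rw [pvGA]
    rw [dif_pos hkl]
    by_cases hm : ((k : Nat) : Int) ∈ pvEvs s spans
    · rw [if_pos hm]
      have hO : pvOT2 s spans (k : Int) = pvOTags spans (k : Int) := by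
        unfold pvOT2
        rw [if_pos (by exact_mod_cast hkl)]
      rw [hO, htake, hC1]
      simp
    · rw [if_neg hm]
      have hO : pvOTags spans ((k : Nat) : Int) = [] :=
        pvOTags_nil_of _ _ (pvOL_nil_of_not_evs s spans _ ⟨by positivity, by exact_mod_cast hkl⟩ hm)
      have hC : pvCT2 spans ((k : Nat) : Int) = [] := by
        unfold pvCT2
        split
        · next h1 =>
          exact pvCTags_nil_of _ _ (pvCL_nil_of_not_evs s spans _ ⟨h1, by omega⟩ hm)
        · rfl
      rw [hC, hO, htake, hC1]
      simp
  · have hke : k = s.toList.length := by omega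
    conv_lhs => rw [pvFg]
    rw [if_pos hk]
    rw [pvFg_gt _ _ _ _ (k + 1) (by omega)]
    have htake : (s.toList.drop k).take 1 = [] := by
      rw [List.drop_eq_nil_of_le (by omega)]
      rfl
    have hGA : pvGA s.toList spans k = [] := by
      rw [pvGA]
      rw [dif_neg hkl]
    by_cases hm : ((k : Nat) : Int) ∈ pvEvs s spans
    · rw [if_pos hm]
      have hO : pvOT2 s spans (k : Int) = [] := by
        unfold pvOT2
        rw [if_neg (by omega)]
      rw [hO, htake, hGA]
      simp
    · rw [if_neg hm]
      have hC : pvCT2 spans ((k : Nat) : Int) = [] := by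
        unfold pvCT2
        split
        · next h1 =>
          exact pvCTags_nil_of _ _ (pvCL_nil_of_not_evs s spans _ ⟨h1, by omega⟩ hm)
        · rfl
      rw [hC, htake, hGA]
      simp
termination_by s.toList.length + 1 - k
decreasing_by omega

-- ---- loop-to-normal-form lemmas ----
theorem pvA_loop (s : String) (spans : List (Int × Int × String × Int))
    (l : List Char) (k : Nat) (out : List String) (hl : s.toList.drop k = l) :
    pvJC ((PySem.List.enumerate l (k : Int)).foldl (fun out ic =>
      let out := if (pvAD spans).1.contains ic.1 then
          (PySem.List.sorted ((pvAD spans).1.getD ic.1 []) (fun x => x.1)).foldl (fun o t => o ++ [t.2]) out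
        else out
      let out := out ++ [String.singleton ic.2]
      if (pvAD spans).2.contains (ic.1 + 1) then
          (PySem.List.sorted ((pvAD spans).2.getD (ic.1 + 1) []) (fun x => -x.1)).foldl (fun o t => o ++ [t.2]) out
        else out) out)
      = pvJC out ++ pvGA s.toList spans k := by
  induction l generalizing k out with
  | nil =>
    rw [PySem.List.enumerate_nil, List.foldl_nil]
    have hge : s.toList.length ≤ k := by
      have := congrArg List.length hl
      simp only [List.length_drop, List.length_nil] at this
      omega
    rw [pvGA, dif_neg (by omega), List.append_nil]
  | cons c l ih =>
    have hk : k < s.toList.length := by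
      have := congrArg List.length hl
      simp only [List.length_drop, List.length_cons] at this
      omega
    have hck : s.toList[k] = c ∧ s.toList.drop (k + 1) = l := by
      rw [List.drop_eq_getElem_cons hk] at hl
      exact ⟨(List.cons.injEq _ _ _ _ ▸ hl).1, (List.cons.injEq _ _ _ _ ▸ hl).2⟩
    rw [PySem.List.enumerate_cons, List.foldl_cons]
    have hblock : ∀ ic : Int × Char,
        (let out1 := if (pvAD spans).1.contains ic.1 then
            (PySem.List.sorted ((pvAD spans).1.getD ic.1 []) (fun x => x.1)).foldl (fun o t => o ++ [t.2]) out
          else out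
         let out2 := out1 ++ [String.singleton ic.2]
         if (pvAD spans).2.contains (ic.1 + 1) then
            (PySem.List.sorted ((pvAD spans).2.getD (ic.1 + 1) []) (fun x => -x.1)).foldl (fun o t => o ++ [t.2]) out2
          else out2)
        = out ++ ((PySem.List.sorted (pvOL spans ic.1) (fun x => x.1)).map (·.2)
            ++ ([String.singleton ic.2]
            ++ (PySem.List.sorted (pvCL spans (ic.1 + 1)) (fun x => -x.1)).map (·.2))) := by
      intro ic
      dsimp only
      rw [pvAD_fst_getD, pvAD_snd_getD]
      split
      · rw [PySem.List.foldl_append_singleton_eq_map]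
        split
        · rw [PySem.List.foldl_append_singleton_eq_map]
          simp [List.append_assoc]
        · next hc1 =>
          rw [pvAD_fst_not_mem spans _ (by simpa using hc1)]
          simp [PySem.List.sorted]
      · next hc2 =>
        rw [pvAD_snd_not_mem spans _ (by simpa using hc2)]
        split
        · rw [PySem.List.foldl_append_singleton_eq_map]
          simp [PySem.List.sorted, List.append_assoc]
        · next hc1 =>
          rw [pvAD_fst_not_mem spans _ (by simpa using hc1)]
          simp [PySem.List.sorted]
    rw [hblock ((k : Int), c)]
    rw [show ((k : Int) + 1) = (((k + 1 : Nat)) : Int) by push_cast; ring]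
    rw [ih (k + 1) _ hck.2]
    rw [pvJC_append, pvJC_append, pvJC_append]
    conv_rhs => rw [pvGA, dif_pos hk]
    rw [hck.1]
    unfold pvOTags pvCTags
    simp [pvJC, List.append_assoc]

theorem pvB_loop (s : String) (spans : List (Int × Int × String × Int))
    (ps : List Int) (prev : Int) (out : List String) :
    pvJC ((ps.foldl (fun acc p =>
        let parts := acc.1 ++ [PySem.Str.slice s (some acc.2) (some p)]
        let parts := if 1 ≤ p then
            parts ++ (PySem.List.sorted (spans.filter (fun sp => sp.2.1 == p)) (fun sp => -sp.2.2.2)).map (·.2.2.1)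
          else parts
        let parts := if p < PySem.Str.len s then
            parts ++ (PySem.List.sorted (spans.filter (fun sp => sp.1 == p)) (fun sp => sp.2.2.2)).map (·.2.2.1)
          else parts
        (parts, p)) (out, prev)).1
      ++ [PySem.Str.slice s (some ((ps.foldl (fun acc p =>
        let parts := acc.1 ++ [PySem.Str.slice s (some acc.2) (some p)]
        let parts := if 1 ≤ p then
            parts ++ (PySem.List.sorted (spans.filter (fun sp => sp.2.1 == p)) (fun sp => -sp.2.2.2)).map (·.2.2.1)
          else parts
        let parts := if p < PySem.Str.len s then
            parts ++ (PySem.List.sorted (spans.filter (fun sp => sp.1 == p)) (fun sp => sp.2.2.2)).map (·.2.2.1)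
          else parts
        (parts, p)) (out, prev)).2)) none])
      = pvJC out ++ pvWalk s.toList (pvOT2 s spans) (pvCT2 spans) ps prev := by
  induction ps generalizing prev out with
  | nil =>
    rw [List.foldl_nil]
    show pvJC (out ++ [PySem.Str.slice s (some prev) none]) = pvJC out ++ PySem.List.slice s.toList (some prev) none
    rw [pvJC_append]
    simp [pvJC, PySem.Str.toList_slice]
  | cons p ps ih =>
    rw [List.foldl_cons]
    dsimp only
    rw [ih]
    have hsl : pvJC [PySem.Str.slice s (some prev) (some p)] = PySem.List.slice s.toList (some prev) (some p) := by
      simp [pvJC, PySem.Str.toList_slice]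
    have hparts : pvJC (if p < PySem.Str.len s
        then (if 1 ≤ p then (out ++ [PySem.Str.slice s (some prev) (some p)]) ++ (PySem.List.sorted (spans.filter (fun sp => sp.2.1 == p)) (fun sp => -sp.2.2.2)).map (·.2.2.1) else (out ++ [PySem.Str.slice s (some prev) (some p)])) ++ (PySem.List.sorted (spans.filter (fun sp => sp.1 == p)) (fun sp => sp.2.2.2)).map (·.2.2.1)
        else (if 1 ≤ p then (out ++ [PySem.Str.slice s (some prev) (some p)]) ++ (PySem.List.sorted (spans.filter (fun sp => sp.2.1 == p)) (fun sp => -sp.2.2.2)).map (·.2.2.1) else (out ++ [PySem.Str.slice s (some prev) (some p)])))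
        = pvJC out ++ (PySem.List.slice s.toList (some prev) (some p) ++ (pvCT2 spans p ++ pvOT2 s spans p)) := by
      unfold pvCT2 pvOT2
      rw [PySem.Str.len_eq]
      split_ifs with h1 h2 h3
      · simp only [pvJC_append, pvCText, pvOText, hsl]
        simp [List.append_assoc]
      · simp only [pvJC_append, pvOText, hsl]
        simp [List.append_assoc]
      · simp only [pvJC_append, pvCText, hsl]
        simp [List.append_assoc]
      · simp only [pvJC_append, hsl]
        simp
    rw [hparts]
    show _ = pvJC out ++ (PySem.List.slice s.toList (some prev) (some p) ++ pvCT2 spans p ++ pvOT2 s spans p ++ pvWalk s.toList (pvOT2 s spans) (pvCT2 spans) ps p)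
    simp [List.append_assoc]

theorem pvB_toList (s : String) (spans : List (Int × Int × String × Int)) :
    (insert_nested_tags_alt s spans).toList = pvGA s.toList spans 0 := by
  have hB : insert_nested_tags_alt s spans = PySem.Str.join ""
      (((pvEvs s spans).foldl (fun acc p =>
        let parts := acc.1 ++ [PySem.Str.slice s (some acc.2) (some p)]
        let parts := if 1 ≤ p then
            parts ++ (PySem.List.sorted (spans.filter (fun sp => sp.2.1 == p)) (fun sp => -sp.2.2.2)).map (·.2.2.1)
          else parts
        let parts := if p < PySem.Str.len s then
            parts ++ (PySem.List.sorted (spans.filter (fun sp => sp.1 == p)) (fun sp => sp.2.2.2)).map (·.2.2.1)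
          else parts
        (parts, p)) ([], 0)).1
      ++ [PySem.Str.slice s (some (((pvEvs s spans).foldl (fun acc p =>
        let parts := acc.1 ++ [PySem.Str.slice s (some acc.2) (some p)]
        let parts := if 1 ≤ p then
            parts ++ (PySem.List.sorted (spans.filter (fun sp => sp.2.1 == p)) (fun sp => -sp.2.2.2)).map (·.2.2.1)
          else parts
        let parts := if p < PySem.Str.len s then
            parts ++ (PySem.List.sorted (spans.filter (fun sp => sp.1 == p)) (fun sp => sp.2.2.2)).map (·.2.2.1)
          else parts
        (parts, p)) ([], 0)).2)) none]) := rfl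
  rw [hB, pvJC_join, pvB_loop s spans (pvEvs s spans) 0 []]
  have hw := pvWalk_eq_pvFg s.toList (pvOT2 s spans) (pvCT2 spans) (pvEvs s spans) 0
    (pvEvs_pairwise s spans)
    (fun p hp => by
      have := pvEvs_bounds s spans p hp
      constructor
      · simp only [Nat.cast_zero]
        omega
      · omega)
  rw [show (0 : Int) = ((0 : Nat) : Int) from rfl, hw]
  rw [pvFg_evs s spans 0 (Nat.zero_le _)]
  have hC0 : pvCT2 spans ((0 : Nat) : Int) = [] := by
    unfold pvCT2
    rw [if_neg (by omega)]
  rw [hC0]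
  rfl

theorem pvA_toList (s : String) (spans : List (Int × Int × String × Int)) :
    (insert_nested_tags s spans).toList
      = pvGA s.toList spans 0 ++ pvCTags spans (s.toList.length : Int) := by
  have hA : insert_nested_tags s spans = PySem.Str.join ""
      (if (pvAD spans).2.contains (PySem.Str.len s) then
        (PySem.List.sorted ((pvAD spans).2.getD (PySem.Str.len s) []) (fun x => -x.1)).foldl (fun o t => o ++ [t.2])
          ((PySem.List.enumerate s.toList 0).foldl (fun out ic =>
            let out := if (pvAD spans).1.contains ic.1 then
                (PySem.List.sorted ((pvAD spans).1.getD ic.1 []) (fun x => x.1)).foldl (fun o t => o ++ [t.2]) out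
              else out
            let out := out ++ [String.singleton ic.2]
            if (pvAD spans).2.contains (ic.1 + 1) then
                (PySem.List.sorted ((pvAD spans).2.getD (ic.1 + 1) []) (fun x => -x.1)).foldl (fun o t => o ++ [t.2]) out
              else out) [])
      else
        (PySem.List.enumerate s.toList 0).foldl (fun out ic =>
            let out := if (pvAD spans).1.contains ic.1 then
                (PySem.List.sorted ((pvAD spans).1.getD ic.1 []) (fun x => x.1)).foldl (fun o t => o ++ [t.2]) out
              else out
            let out := out ++ [String.singleton ic.2]
            if (pvAD spans).2.contains (ic.1 + 1) then
                (PySem.List.sorted ((pvAD spans).2.getD (ic.1 + 1) []) (fun x => -x.1)).foldl (fun o t => o ++ [t.2]) out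
              else out) []) := rfl
  have hloop : pvJC ((PySem.List.enumerate s.toList 0).foldl (fun out ic =>
            let out := if (pvAD spans).1.contains ic.1 then
                (PySem.List.sorted ((pvAD spans).1.getD ic.1 []) (fun x => x.1)).foldl (fun o t => o ++ [t.2]) out
              else out
            let out := out ++ [String.singleton ic.2]
            if (pvAD spans).2.contains (ic.1 + 1) then
                (PySem.List.sorted ((pvAD spans).2.getD (ic.1 + 1) []) (fun x => -x.1)).foldl (fun o t => o ++ [t.2]) out
              else out) []) = pvGA s.toList spans 0 := by
    have h := pvA_loop s spans s.toList 0 [] (by simp)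
    simpa using h
  rw [hA, pvJC_join, PySem.Str.len_eq]
  split
  · next hc =>
    rw [PySem.List.foldl_append_singleton_eq_map, pvJC_append, pvAD_snd_getD, hloop]
    rfl
  · next hc =>
    rw [pvCTags_nil_of spans _ (pvAD_snd_not_mem spans _ (by simpa using hc)), hloop, List.append_nil]

theorem master (s : String) (spans : List (Int × Int × String × Int)) :
    (insert_nested_tags s spans).toList
      = (insert_nested_tags_alt s spans).toList ++ pvCTags spans (s.toList.length : Int) := by
  rw [pvA_toList, pvB_toList]

theorem pvCTags_nil_of_notD (s : String) (spans : List (Int × Int × String × Int))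
    (hD : ¬ D_insert_nested_tags s spans) : pvCTags spans (s.toList.length : Int) = [] := by
  unfold D_insert_nested_tags at hD
  push Not at hD
  unfold pvCTags pvJC
  rw [List.flatten_eq_nil_iff]
  intro l hl
  rw [List.mem_map] at hl
  obtain ⟨t, ht, rfl⟩ := hl
  rw [List.mem_map] at ht
  obtain ⟨p, hp, rfl⟩ := ht
  rw [PySem.List.mem_sorted] at hp
  simp only [pvCL, List.mem_map, List.mem_filter, beq_iff_eq] at hp
  obtain ⟨sp, ⟨hsp, hen⟩, rfl⟩ := hp
  have := hD sp hsp hen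
  simp [pvTag, this]

theorem pvCTags_ne_nil_of_D (s : String) (spans : List (Int × Int × String × Int))
    (hD : D_insert_nested_tags s spans) : pvCTags spans (s.toList.length : Int) ≠ [] := by
  obtain ⟨sp, hsp, hen, htg⟩ := hD
  intro h
  unfold pvCTags pvJC at h
  rw [List.flatten_eq_nil_iff] at h
  have hmem : sp.2.2.1.toList ∈ (((PySem.List.sorted (pvCL spans (s.toList.length : Int)) (fun x => -x.1)).map (·.2)).map String.toList) := by
    apply List.mem_map_of_mem
    refine List.mem_map.mpr ⟨pvTag sp, ?_, rfl⟩
    rw [PySem.List.mem_sorted]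
    simp only [pvCL, List.mem_map, List.mem_filter, beq_iff_eq]
    exact ⟨sp, ⟨hsp, hen⟩, rfl⟩
  have := h _ hmem
  apply htg
  apply String.toList_inj.mp
  simpa using this

-- ===== VERDICT (by name: the statement is the Claim_ definition above) =====
theorem insert_nested_tags_spec : Claim_unchanged_insert_nested_tags := by
  intro s spans _ hD
  apply String.toList_inj.mp
  rw [master, pvCTags_nil_of_notD s spans hD, List.append_nil]

theorem insert_nested_tags_changed : Claim_changed_insert_nested_tags := by
  unfold Claim_changed_insert_nested_tags; decide

theorem insert_nested_tags_tight : Claim_exact_insert_nested_tags := by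
  intro s spans _ hD heq
  have h := master s spans
  rw [heq] at h
  have hl := congrArg List.length h
  simp only [List.length_append] at hl
  have hlen : (pvCTags spans (s.toList.length : Int)).length = 0 := by omega
  exact pvCTags_ne_nil_of_D s spans hD (List.length_eq_zero_iff.mp hlen)
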